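-- pv_equiv track=rewrite | github.com/Erotemic/utool | utool/util_tests.py | read_exampleblock
-- ===== SOURCE A (Python) =====
-- def read_exampleblock(docblock):
--     # if False:
--     #     no longer needed with new parser
--     #     import utool as ut
--     #     nonheader_src = ut.unindent('\n'.join(docblock.splitlines()[1:]))
--     nonheader_src = docblock
--     nonheader_lines = nonheader_src.splitlines()
--     reversed_src_lines = []
--     reversed_want_lines = []
--     finished_want = False
--
--     # Read the example block backwards to get the want string
--     # and then the rest should all be source
--     for line in reversed(nonheader_lines):
--         if not finished_want:
--             if line.startswith('>>> ') or line.startswith('... '):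
--                 finished_want = True
--             else:
--                 reversed_want_lines.append(line)
--                 if len(line.strip()) == 0:
--                     reversed_want_lines = []
--                 continue
--         reversed_src_lines.append(line[4:])
--     test_src = '\n'.join(reversed_src_lines[::-1])
--     test_want = '\n'.join(reversed_want_lines[::-1])
--     return test_src, test_want
-- ===== SOURCE B (Python) =====
-- def read_exampleblock(docblock):
--     # Forward single pass instead of A's reverse stateful scan:
--     # find the last '>>> '/'... ' line, source = everything up to it (each [4:]),
--     # want = the following lines up to the first blank line.
--     lines = docblock.splitlines()
--     n = 0
--     for i, line in enumerate(lines, 1):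
--         if line.startswith('>>> ') or line.startswith('... '):
--             n = i
--     test_src = '\n'.join(line[4:] for line in lines[:n])
--     want_lines = []
--     for line in lines[n:]:
--         if len(line.strip()) == 0:
--             break
--         want_lines.append(line)
--     test_want = '\n'.join(want_lines)
--     return test_src, test_want
-- ===== Notes on version B (the rewrite author's own statement) =====
-- stated objective: alternative
-- what changed: Replaces A's backward stateful scan (three-part mutable state with a blank-line reset and double list reversals) by a forward decomposition: find the 1-based index of the last '>>> '/'... ' line, then source = the lines up to it each stripped of 4 chars, want = the following lines up to the first blank line.
import Mathlib
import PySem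

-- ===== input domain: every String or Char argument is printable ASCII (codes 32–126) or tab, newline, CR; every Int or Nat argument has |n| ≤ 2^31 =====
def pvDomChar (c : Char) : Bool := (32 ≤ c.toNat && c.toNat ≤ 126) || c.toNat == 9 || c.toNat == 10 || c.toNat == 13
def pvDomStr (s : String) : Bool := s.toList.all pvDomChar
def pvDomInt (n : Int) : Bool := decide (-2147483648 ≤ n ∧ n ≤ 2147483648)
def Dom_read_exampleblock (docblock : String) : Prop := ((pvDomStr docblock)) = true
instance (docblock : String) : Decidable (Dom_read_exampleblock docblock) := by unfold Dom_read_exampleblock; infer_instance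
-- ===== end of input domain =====

-- B replaces A's reverse stateful scan by a forward decomposition (last-prefix index, then prefix/suffix handling); objective: alternative/simpler.


-- shared by both Pythons: the '>>> '/'... ' prefix test, the blank test, line[4:]
def pvP (line : String) : Bool :=
  PySem.Str.startswith line ">>> " || PySem.Str.startswith line "... "

def pvBlank (line : String) : Bool :=
  PySem.Str.len (PySem.Str.strip line) == 0

def pvDrop4 (line : String) : String :=
  PySem.Str.slice line (some 4) none

-- ===== PORT A =====
-- loop body of A's backward scan; state = (reversed_src_lines, reversed_want_lines, finished_want)
def pvStepA (st : List String × List String × Bool) (line : String) :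
    List String × List String × Bool :=
  match st with
  | (src, want, fin) =>
    if fin then (src ++ [pvDrop4 line], want, fin)
    else if pvP line then (src ++ [pvDrop4 line], want, true)
    else
      let want' := want ++ [line]
      if pvBlank line then (src, [], false) else (src, want', false)

def read_exampleblock (docblock : String) : String × String :=
  let nonheader_lines := PySem.Str.splitlines docblock
  let res := nonheader_lines.reverse.foldl pvStepA ([], [], false)
  (PySem.Str.join "\n" res.1.reverse, PySem.Str.join "\n" res.2.1.reverse)

-- ===== PORT B =====
-- B's want loop: collect lines until the first blank one (Python loop with break)
def pvWantLoop : List String → List String → List String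
  | [], acc => acc
  | l :: ls, acc => if pvBlank l then acc else pvWantLoop ls (acc ++ [l])

def read_exampleblock_alt (docblock : String) : String × String :=
  let lines := PySem.Str.splitlines docblock
  let n : Int :=
    (PySem.List.enumerate lines 1).foldl (fun n p => if pvP p.2 then p.1 else n) 0
  let test_src :=
    PySem.Str.join "\n" ((PySem.List.slice lines none (some n)).map pvDrop4)
  let test_want :=
    PySem.Str.join "\n" (pvWantLoop (PySem.List.slice lines (some n) none) [])
  (test_src, test_want)

-- ===== PRECONDITION & SPEC =====
def Spec_read_exampleblock (docblock : String) (out : String × String) : Prop := out = read_exampleblock_alt docblock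
instance (docblock : String) (out : String × String) : Decidable (Spec_read_exampleblock docblock out) := by unfold Spec_read_exampleblock; infer_instance

-- ===== CLAIM (what is proved, stated in full; the proofs are below) =====
def Claim_equal_read_exampleblock : Prop := ∀ (docblock : String), Dom_read_exampleblock docblock → Spec_read_exampleblock docblock (read_exampleblock docblock)

-- ===== LEMMAS AND PROOFS =====

-- source lines of the result, in forward order: everything up to the last pvP line, each [4:]
def pvSrcPart : List String → List String
  | [] => []
  | a :: ls => if pvP a || ls.any pvP then pvDrop4 a :: pvSrcPart ls else []

-- want lines of the result, in forward order: after the last pvP line, up to the first blank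
def pvWantPart : List String → List String
  | [] => []
  | a :: ls =>
    if pvP a || ls.any pvP then pvWantPart ls
    else if pvBlank a then [] else a :: pvWantPart ls

-- 1-based index of the last pvP line (0 if none)
def pvLastN : List String → Nat
  | [] => 0
  | a :: ls => if ls.any pvP then pvLastN ls + 1 else if pvP a then 1 else 0

theorem pvSrcPart_of_not_any {ls : List String} (h : ls.any pvP = false) :
    pvSrcPart ls = [] := by
  cases ls with
  | nil => rfl
  | cons a ls =>
    simp only [List.any_cons, Bool.or_eq_false_iff] at h
    simp [pvSrcPart, h.1, h.2]

theorem pvWantPart_of_not_any {ls : List String} (h : ls.any pvP = false) :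
    pvWantPart ls = ls.takeWhile (fun l => !pvBlank l) := by
  induction ls with
  | nil => rfl
  | cons a ls ih =>
    simp only [List.any_cons, Bool.or_eq_false_iff] at h
    simp only [pvWantPart, h.1, h.2, Bool.or_self, if_neg Bool.false_ne_true,
      List.takeWhile_cons]
    by_cases hb : pvBlank a = true <;> simp [hb, ih h.2]

-- A's backward fold, characterised
theorem pvFoldA (lines : List String) :
    lines.reverse.foldl pvStepA ([], [], false) =
      ((pvSrcPart lines).reverse, (pvWantPart lines).reverse, lines.any pvP) := by
  rw [List.foldl_reverse]
  induction lines with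
  | nil => rfl
  | cons a ls ih =>
    simp only [List.foldr_cons, ih, List.any_cons]
    by_cases hany : ls.any pvP = true
    · simp [pvStepA, pvSrcPart, pvWantPart, hany]
    · simp only [Bool.not_eq_true] at hany
      by_cases hp : pvP a = true
      · simp [pvStepA, pvSrcPart, pvWantPart, hany, hp,
          pvSrcPart_of_not_any hany]
      · simp only [Bool.not_eq_true] at hp
        by_cases hb : pvBlank a = true
        · simp [pvStepA, pvSrcPart, pvWantPart, hany, hp, hb,
            pvSrcPart_of_not_any hany]
        · simp only [Bool.not_eq_true] at hb
          simp [pvStepA, pvSrcPart, pvWantPart, hany, hp, hb,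
            pvSrcPart_of_not_any hany]

-- B's index fold, characterised
theorem pvFoldB (ls : List String) (s acc : Int) :
    (PySem.List.enumerate ls s).foldl (fun n p => if pvP p.2 then p.1 else n) acc =
      if ls.any pvP then s + (pvLastN ls : Int) - 1 else acc := by
  induction ls generalizing s acc with
  | nil => simp [PySem.List.enumerate_nil]
  | cons a ls ih =>
    rw [PySem.List.enumerate_cons]
    simp only [List.foldl_cons, List.any_cons, pvLastN]
    by_cases hany : ls.any pvP = true
    · simp only [hany, Bool.or_true, if_true, ih]
      push_cast
      ring_nf
    · simp only [Bool.not_eq_true] at hany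
      by_cases hp : pvP a = true <;> simp [hp, hany, ih]

theorem pvTake_lastN (lines : List String) :
    (lines.take (pvLastN lines)).map pvDrop4 = pvSrcPart lines := by
  induction lines with
  | nil => rfl
  | cons a ls ih =>
    simp only [pvLastN, pvSrcPart]
    by_cases hany : ls.any pvP = true
    · simp [hany, ih]
    · simp only [Bool.not_eq_true] at hany
      by_cases hp : pvP a = true
      · simp [hp, hany, pvSrcPart_of_not_any hany]
      · simp [hp, hany]

theorem pvDrop_lastN (lines : List String) :
    (lines.drop (pvLastN lines)).takeWhile (fun l => !pvBlank l) = pvWantPart lines := by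
  induction lines with
  | nil => rfl
  | cons a ls ih =>
    simp only [pvLastN, pvWantPart]
    by_cases hany : ls.any pvP = true
    · simp [hany, ih]
    · simp only [Bool.not_eq_true] at hany
      by_cases hp : pvP a = true
      · simp [hp, hany, pvWantPart_of_not_any hany]
      · simp only [hp, hany]
        by_cases hb : pvBlank a = true <;>
          simp [hb, pvWantPart_of_not_any hany]

theorem pvLastN_of_not_any {ls : List String} (h : ls.any pvP = false) :
    pvLastN ls = 0 := by
  cases ls with
  | nil => rfl
  | cons a ls =>
    simp only [List.any_cons, Bool.or_eq_false_iff] at h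
    simp [pvLastN, h.1, h.2]

theorem pvWantLoop_eq (ls : List String) (acc : List String) :
    pvWantLoop ls acc = acc ++ ls.takeWhile (fun l => !pvBlank l) := by
  induction ls generalizing acc with
  | nil => simp [pvWantLoop]
  | cons a ls ih =>
    simp only [pvWantLoop, List.takeWhile_cons]
    by_cases hb : pvBlank a = true <;> simp [hb, ih]

-- ===== VERDICT (by name: the statement is the Claim_ definition above) =====
theorem read_exampleblock_spec : Claim_equal_read_exampleblock := by
  intro docblock _
  unfold Spec_read_exampleblock read_exampleblock read_exampleblock_alt
  dsimp only
  set lines := PySem.Str.splitlines docblock with hl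
  rw [pvFoldA, pvFoldB]
  have hn : (if lines.any pvP then (1 : Int) + (pvLastN lines : Int) - 1 else 0) =
      ((pvLastN lines : Nat) : Int) := by
    by_cases h : lines.any pvP = true
    · simp only [h, if_true]; ring
    · simp only [Bool.not_eq_true] at h
      simp [h, pvLastN_of_not_any h]
  simp only [hn, PySem.List.slice_to_natCast, PySem.List.slice_from_natCast,
    pvWantLoop_eq, List.nil_append, List.reverse_reverse,
    pvTake_lastN, pvDrop_lastN]
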